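-- pv_equiv track=rewrite | github.com/ThreatFlux/threatflux-threat-detection | generate_combined_training_data.py | _create_function_answer
-- ===== SOURCE A (Python) =====
-- from typing import Dict, List, Any
--
-- def _create_function_answer(file_name: str, functions: List[str],
--                            expertise: str) -> str:
--     """Create answer about functions."""
--     lines = [f"# Functions in {file_name}\n"]
--
--     lines.append("Key functions found in the binary:\n")
--
--     # Categorize functions
--     main_funcs = [f for f in functions if 'main' in f.lower()]
--     init_funcs = [f for f in functions if 'init' in f or '_start' in f]
--
--     if main_funcs:
--         lines.append("## Entry Points")
--         for func in main_funcs[:5]: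
--             lines.append(f"- `{func}`")
--
--     if init_funcs:
--         lines.append("\n## Initialization")
--         for func in init_funcs[:5]:
--             lines.append(f"- `{func}`")
--
--     # Other functions
--     other_funcs = [f for f in functions if f not in main_funcs + init_funcs]
--     if other_funcs:
--         lines.append("\n## Other Functions")
--         for func in other_funcs[:15]:
--             lines.append(f"- `{func}`")
--
--     return '\n'.join(lines)
-- ===== SOURCE B (Python) =====
-- from typing import List
--
-- def _create_function_answer(file_name: str, functions: List[str],
--                            expertise: str) -> str:
--     """Create answer about functions: one streaming pass building capped
--     section strings directly (no intermediate lists), then concatenate."""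
--     main_s = init_s = other_s = ""
--     main_n = init_n = other_n = 0
--     for f in functions:
--         m = 'main' in f.lower()
--         i = 'init' in f or '_start' in f
--         if m:
--             if main_n < 5:
--                 main_s += "\n- `" + f + "`"
--             main_n += 1
--         if i:
--             if init_n < 5:
--                 init_s += "\n- `" + f + "`"
--             init_n += 1
--         if not m and not i:
--             if other_n < 15:
--                 other_s += "\n- `" + f + "`"
--             other_n += 1
--     out = "# Functions in " + file_name + "\n\nKey functions found in the binary:\n"
--     if main_n:
--         out += "\n## Entry Points" + main_s
--     if init_n:
--         out += "\n\n## Initialization" + init_s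
--     if other_n:
--         out += "\n\n## Other Functions" + other_s
--     return out
-- ===== Notes on version B (the rewrite author's own statement) =====
-- stated objective: alternative
-- what changed: Replaces A's three list-building filter passes (including the quadratic 'f not in main_funcs + init_funcs' membership scan) and final join-of-lines with a single streaming pass that keeps, per section, a capped markdown string plus a counter, and assembles the report by direct string concatenation with no intermediate line lists.
import Mathlib
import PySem

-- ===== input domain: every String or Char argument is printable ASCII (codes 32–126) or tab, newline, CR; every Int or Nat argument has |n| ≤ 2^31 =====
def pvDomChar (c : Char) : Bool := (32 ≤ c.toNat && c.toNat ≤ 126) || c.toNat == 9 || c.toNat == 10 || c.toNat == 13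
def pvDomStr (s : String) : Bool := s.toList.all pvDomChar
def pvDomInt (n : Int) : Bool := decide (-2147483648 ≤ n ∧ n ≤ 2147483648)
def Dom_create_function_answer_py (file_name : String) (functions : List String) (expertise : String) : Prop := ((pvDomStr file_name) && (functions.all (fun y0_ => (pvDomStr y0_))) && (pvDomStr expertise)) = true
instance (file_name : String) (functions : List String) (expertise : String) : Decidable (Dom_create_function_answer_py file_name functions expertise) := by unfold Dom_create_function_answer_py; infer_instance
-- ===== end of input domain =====

-- B replaces A's three list-building filter passes and join-of-lines by ONE streaming pass that
-- builds the three capped section strings directly with counters, then concatenates; same output.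


-- ===== PORT A =====
-- f"- `{func}`"
def pvLineA (f : String) : String := PySem.Str.join "" ["- `", f, "`"]

def create_function_answer_py (file_name : String) (functions : List String) (expertise : String) : String :=
  let lines : List String := [PySem.Str.join "" ["# Functions in ", file_name, "\n"]]
  let lines := lines ++ ["Key functions found in the binary:\n"]
  let main_funcs := functions.filter (fun f => PySem.Str.isIn "main" (PySem.Str.lower f))
  let init_funcs := functions.filter (fun f => PySem.Str.isIn "init" f || PySem.Str.isIn "_start" f)
  let lines := if main_funcs ≠ [] then
      (main_funcs.take 5).foldl (fun acc f => acc ++ [pvLineA f]) (lines ++ ["## Entry Points"])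
    else lines
  let lines := if init_funcs ≠ [] then
      (init_funcs.take 5).foldl (fun acc f => acc ++ [pvLineA f]) (lines ++ ["\n## Initialization"])
    else lines
  let other_funcs := functions.filter (fun f => !((main_funcs ++ init_funcs).contains f))
  let lines := if other_funcs ≠ [] then
      (other_funcs.take 15).foldl (fun acc f => acc ++ [pvLineA f]) (lines ++ ["\n## Other Functions"])
    else lines
  PySem.Str.join "\n" lines

-- ===== PORT B =====
-- s += "\n- `" + f + "`"
def pvCat (s f : String) : String := PySem.Str.join "" [s, "\n- `", f, "`"]

-- the body of B's single streaming loop: state = ((main_s, main_n), (init_s, init_n), (other_s, other_n))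
def pvStep (st : (String × Nat) × (String × Nat) × (String × Nat)) (f : String) :
    (String × Nat) × (String × Nat) × (String × Nat) :=
  let m := PySem.Str.isIn "main" (PySem.Str.lower f)
  let i := PySem.Str.isIn "init" f || PySem.Str.isIn "_start" f
  let st := if m then ((if st.1.2 < 5 then pvCat st.1.1 f else st.1.1, st.1.2 + 1), st.2) else st
  let st := if i then (st.1, (if st.2.1.2 < 5 then pvCat st.2.1.1 f else st.2.1.1, st.2.1.2 + 1), st.2.2) else st
  if !m && !i then (st.1, st.2.1, (if st.2.2.2 < 15 then pvCat st.2.2.1 f else st.2.2.1, st.2.2.2 + 1)) else st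

def create_function_answer_py_alt (file_name : String) (functions : List String) (expertise : String) : String :=
  let st := functions.foldl pvStep (("", 0), ("", 0), ("", 0))
  let out := PySem.Str.join "" ["# Functions in ", file_name, "\n\nKey functions found in the binary:\n"]
  let out := if st.1.2 ≠ 0 then PySem.Str.join "" [out, "\n## Entry Points", st.1.1] else out
  let out := if st.2.1.2 ≠ 0 then PySem.Str.join "" [out, "\n\n## Initialization", st.2.1.1] else out
  let out := if st.2.2.2 ≠ 0 then PySem.Str.join "" [out, "\n\n## Other Functions", st.2.2.1] else out
  out

-- ===== PRECONDITION & SPEC =====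
def Spec_create_function_answer_py (file_name : String) (functions : List String) (expertise : String) (out : String) : Prop := out = create_function_answer_py_alt file_name functions expertise
instance (file_name : String) (functions : List String) (expertise : String) (out : String) : Decidable (Spec_create_function_answer_py file_name functions expertise out) := by unfold Spec_create_function_answer_py; infer_instance

-- ===== CLAIM =====
def Claim_equal_create_function_answer_py : Prop := ∀ (file_name : String) (functions : List String) (expertise : String), Dom_create_function_answer_py file_name functions expertise → Spec_create_function_answer_py file_name functions expertise (create_function_answer_py file_name functions expertise)

-- ===== LEMMAS AND PROOFS =====

-- abbreviations for the two predicates (proof-side only)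
def pvPm (f : String) : Bool := PySem.Str.isIn "main" (PySem.Str.lower f)
def pvPi (f : String) : Bool := PySem.Str.isIn "init" f || PySem.Str.isIn "_start" f

-- the char-level item "\n- `f`"
def pvLineC (f : String) : List Char := '\n' :: '-' :: ' ' :: '`' :: (f.toList ++ ['`'])

-- B's repeated pvCat over a list, as seen from a starting string
def pvAppAll (s : String) (xs : List String) : String := xs.foldl pvCat s

theorem pvCat_toList (s f : String) : (pvCat s f).toList = s.toList ++ pvLineC f := by
  simp [pvCat, PySem.Chars.join, pvLineC, List.intercalate]

theorem pvAppAll_toList (xs : List String) (s : String) :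
    (pvAppAll s xs).toList = s.toList ++ xs.flatMap pvLineC := by
  induction xs generalizing s with
  | nil => simp [pvAppAll]
  | cons x t ih =>
    show (pvAppAll (pvCat s x) t).toList = _
    simp [ih, pvCat_toList]

-- one step of a capped accumulation, as take/append
theorem pvApp_take (cap n : Nat) (s x : String) (ys : List String) :
    pvAppAll (if n < cap then pvCat s x else s) (ys.take (cap - (n + 1))) =
      pvAppAll s ((x :: ys).take (cap - n)) := by
  by_cases h : n < cap
  · rw [if_pos h]
    have hc : cap - n = (cap - (n + 1)) + 1 := by omega
    rw [hc, List.take_succ_cons]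
    rfl
  · rw [if_neg h]
    have h0 : cap - n = 0 := by omega
    have h1 : cap - (n + 1) = 0 := by omega
    rw [h0, h1]
    simp

-- pvStep componentwise, with the two predicates named
theorem pvStep_eq (st : (String × Nat) × (String × Nat) × (String × Nat)) (f : String) :
    pvStep st f =
      ((if pvPm f then (if st.1.2 < 5 then pvCat st.1.1 f else st.1.1, st.1.2 + 1) else st.1),
       (if pvPi f then (if st.2.1.2 < 5 then pvCat st.2.1.1 f else st.2.1.1, st.2.1.2 + 1) else st.2.1),
       (if !pvPm f && !pvPi f then (if st.2.2.2 < 15 then pvCat st.2.2.1 f else st.2.2.1, st.2.2.2 + 1) else st.2.2)) := by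
  unfold pvStep pvPm pvPi
  cases hm : PySem.Str.isIn "main" (PySem.Str.lower f) <;>
    cases hi : (PySem.Str.isIn "init" f || PySem.Str.isIn "_start" f) <;>
    simp only [hm, hi, Bool.not_true, Bool.not_false, Bool.and_self, Bool.and_false, Bool.and_true,
      Bool.true_and, Bool.false_eq_true, if_false, if_true]

-- B's streaming fold computed in closed form from the three filtered lists
theorem pvFold (l : List String) (st : (String × Nat) × (String × Nat) × (String × Nat)) :
    l.foldl pvStep st =
      ((pvAppAll st.1.1 ((l.filter pvPm).take (5 - st.1.2)), st.1.2 + (l.filter pvPm).length),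
       (pvAppAll st.2.1.1 ((l.filter pvPi).take (5 - st.2.1.2)), st.2.1.2 + (l.filter pvPi).length),
       (pvAppAll st.2.2.1 ((l.filter (fun f => !pvPm f && !pvPi f)).take (15 - st.2.2.2)),
        st.2.2.2 + (l.filter (fun f => !pvPm f && !pvPi f)).length)) := by
  induction l generalizing st with
  | nil => simp [pvAppAll]
  | cons x t ih =>
    obtain ⟨⟨sm, nm⟩, ⟨si, ni⟩, ⟨so, no⟩⟩ := st
    rw [List.foldl_cons, ih, pvStep_eq]
    cases hm : pvPm x <;> cases hi : pvPi x <;>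
      simp only [hm, hi, List.filter_cons, Bool.not_true, Bool.not_false, Bool.and_self,
        Bool.and_false, Bool.and_true, Bool.false_and, Bool.true_and, Bool.false_eq_true,
        if_false, if_true, List.length_cons, Prod.mk.injEq] <;>
      and_intros <;>
      first
        | omega
        | exact pvApp_take _ _ _ _ _
        | rfl
        | trivial

-- join "\n" with a nonempty list, at char level
theorem pvJoinNl (x : List Char) (xs : List (List Char)) :
    PySem.Chars.join ['\n'] (x :: xs) = x ++ xs.flatMap (fun y => '\n' :: y) := by
  induction xs generalizing x with
  | nil => simp [PySem.Chars.join_singleton]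
  | cons y t ih => simp [PySem.Chars.join_cons_cons, ih]

-- A's membership-based "other" filter equals the "neither predicate" filter
theorem pvOther_filter (functions : List String) :
    functions.filter (fun f =>
        !((functions.filter (fun f => PySem.Str.isIn "main" (PySem.Str.lower f)) ++
           functions.filter (fun f => PySem.Str.isIn "init" f || PySem.Str.isIn "_start" f)).contains f)) =
    functions.filter (fun f => !(PySem.Str.isIn "main" (PySem.Str.lower f)) &&
                               !(PySem.Str.isIn "init" f || PySem.Str.isIn "_start" f)) := by
  apply List.filter_congr
  intro f hf
  simp [List.mem_filter, hf]

-- join with empty separator is flatten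
theorem pvJoin0 (l : List (List Char)) : PySem.Chars.join [] l = l.flatten := by
  induction l with
  | nil => simp [PySem.Chars.join_nil]
  | cons x t ih =>
    cases t with
    | nil => simp [PySem.Chars.join_singleton]
    | cons y u => simp [PySem.Chars.join_cons_cons] at ih ⊢; simp [ih]

-- pull a common prefix out of an if (canonicalizes A's nested line-list ifs)
theorem pvIfApp {α : Type} (c : Prop) [Decidable c] (X a : List α) :
    (if c then X ++ a else X) = X ++ (if c then a else []) := by
  split <;> simp

theorem pvLineA_toList (f : String) :
    (pvLineA f).toList = '-' :: ' ' :: '`' :: (f.toList ++ ['`']) := by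
  simp [pvLineA, PySem.Chars.join, List.intercalate]

-- items of one capped section, at char level
theorem pvFlatLine (n : Nat) (xs : List String) :
    List.flatMap (fun y => '\n' :: y) (List.take n (xs.map (String.toList ∘ pvLineA))) =
      List.flatMap pvLineC (xs.take n) := by
  induction xs generalizing n with
  | nil => simp
  | cons x t ih =>
    cases n with
    | zero => simp
    | succ m => simp [ih, pvLineC, pvLineA_toList, Function.comp]

theorem pvT0 : ("\n" : String).toList = ['\n'] := rfl
theorem pvT1 : ("\n\nKey functions found in the binary:\n" : String).toList =
    '\n' :: '\n' :: ("Key functions found in the binary:\n" : String).toList := rfl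
theorem pvT2 : ("\n\n## Initialization" : String).toList =
    '\n' :: ("\n## Initialization" : String).toList := rfl
theorem pvT3 : ("\n\n## Other Functions" : String).toList =
    '\n' :: ("\n## Other Functions" : String).toList := rfl
theorem pvT4 : ("\n## Entry Points" : String).toList =
    '\n' :: ("## Entry Points" : String).toList := rfl

-- ===== VERDICT =====
theorem create_function_answer_py_spec : Claim_equal_create_function_answer_py := by
  intro file_name functions expertise _
  show create_function_answer_py file_name functions expertise =
       create_function_answer_py_alt file_name functions expertise
  unfold create_function_answer_py create_function_answer_py_alt
  rw [pvFold]
  simp only [pvOther_filter, PySem.List.foldl_append_singleton_eq_map, Nat.zero_add]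
  rw [show (fun f => PySem.Str.isIn "main" (PySem.Str.lower f)) = pvPm from rfl,
      show (fun f => PySem.Str.isIn "init" f || PySem.Str.isIn "_start" f) = pvPi from rfl,
      show (fun f => !PySem.Str.isIn "main" (PySem.Str.lower f) &&
            !(PySem.Str.isIn "init" f || PySem.Str.isIn "_start" f)) =
           (fun f => !pvPm f && !pvPi f) from rfl]
  simp only [ne_eq, List.length_eq_zero_iff]
  by_cases hM : functions.filter pvPm = [] <;>
    by_cases hI : functions.filter pvPi = [] <;>
    by_cases hO : functions.filter (fun f => !pvPm f && !pvPi f) = [] <;>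
    simp only [hM, hI, hO, not_true_eq_false, not_false_eq_true, if_true, if_false,
      List.take_nil, List.map_nil, if_neg, eq_self_iff_true] <;>
    apply String.toList_inj.mp <;>
    simp [pvIfApp, List.append_assoc, pvJoin0, pvT0, pvT1, pvT2, pvT3, pvT4, pvJoinNl,
      pvAppAll_toList, pvLineA_toList, pvLineC, List.flatMap_append, List.map_map,
      Function.comp, pvFlatLine]
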